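-- pv_equiv track=rewrite | github.com/PLSE-Lab/Python-MLAPI-expl | python_sources/eda-to-insight.py | addDictionary
-- ===== SOURCE A (Python) =====
-- def addDictionary(data) :
--
--     dataList = data.split(" ")
--     numOfVehicles = len(dataList) /7
--     variables = ["modeltype", "yaw", "pitch", "roll", "x", "y", "z"]
--     listOfData = []
--     for i in range(0,len(dataList),7) :
--
--         lastIndex = i+7
--         dt = dataList[i:lastIndex:1]
--         dct = dict(zip(variables,dt))
--         listOfData.append(dct)
--     return listOfData
-- ===== SOURCE B (Python) =====
-- def addDictionary(data):
--     variables = ["modeltype", "yaw", "pitch", "roll", "x", "y", "z"]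
--     listOfData = []
--     buf = []
--     for tok in data.split(" "):
--         buf.append(tok)
--         if len(buf) == 7:
--             listOfData.append(dict(zip(variables, buf)))
--             buf = []
--     if buf:
--         listOfData.append(dict(zip(variables, buf)))
--     return listOfData
-- ===== Notes on version B (the rewrite author's own statement) =====
-- stated objective: alternative
-- what changed: Replaces the index-based stride-7 range loop with list slicing by a single pass over the tokens that accumulates a buffer and emits a dict each time it fills (flushing the partial remainder).
import Mathlib
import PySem

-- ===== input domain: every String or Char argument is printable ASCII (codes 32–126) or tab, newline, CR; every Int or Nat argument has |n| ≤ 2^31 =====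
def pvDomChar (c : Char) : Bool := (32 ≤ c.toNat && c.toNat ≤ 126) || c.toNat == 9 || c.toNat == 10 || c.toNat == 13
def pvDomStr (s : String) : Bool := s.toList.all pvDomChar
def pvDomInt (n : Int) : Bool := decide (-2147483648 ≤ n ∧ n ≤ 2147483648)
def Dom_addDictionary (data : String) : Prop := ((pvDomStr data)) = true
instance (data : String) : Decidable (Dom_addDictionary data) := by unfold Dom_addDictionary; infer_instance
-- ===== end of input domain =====

-- B replaces A's stride-7 index loop with slicing by a single buffered pass over the tokens (alternative decomposition, same cost).

-- ===== PORT A =====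
def addDictionary (data : String) : List (List (String × String)) :=
  let dataList := (PySem.Str.split? data " ").getD []  -- sep is the nonempty literal " ", so split? is always `some`
  -- numOfVehicles = len(dataList) / 7 is a float that is never used; omitted
  let vars : List String := ["modeltype", "yaw", "pitch", "roll", "x", "y", "z"]
  (PySem.List.pyRange 0 (dataList.length : Int) 7).foldl
    (fun listOfData i =>
      let lastIndex := i + 7
      let dt := PySem.List.slice dataList (some i) (some lastIndex)  -- the Python slice's step is the literal 1
      let dct := (PySem.Dict.ofList (vars.zip dt)).items  -- dict(zip(variables, dt))
      listOfData ++ [dct]) []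

-- ===== PORT B =====
def addDictionary_alt (data : String) : List (List (String × String)) :=
  let vars : List String := ["modeltype", "yaw", "pitch", "roll", "x", "y", "z"]
  let st := ((PySem.Str.split? data " ").getD []).foldl
    (fun (st : List (List (String × String)) × List String) tok =>
      let buf := st.2 ++ [tok]
      if buf.length = 7 then (st.1 ++ [(PySem.Dict.ofList (vars.zip buf)).items], [])
      else (st.1, buf)) ([], [])
  if st.2 = [] then st.1 else st.1 ++ [(PySem.Dict.ofList (vars.zip st.2)).items]

-- ===== PRECONDITION & SPEC =====
def Spec_addDictionary (data : String) (out : List (List (String × String))) : Prop := out = addDictionary_alt data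
instance (data : String) (out : List (List (String × String))) : Decidable (Spec_addDictionary data out) := by unfold Spec_addDictionary; infer_instance

-- ===== CLAIM (what is proved, stated in full; the proofs are below) =====
def Claim_equal_addDictionary : Prop := ∀ (data : String), Dom_addDictionary data → Spec_addDictionary data (addDictionary data)

-- ===== LEMMAS AND PROOFS =====

-- the dict built from one chunk of tokens
def pvMkd (vs : List String) : List (String × String) :=
  (PySem.Dict.ofList ((["modeltype", "yaw", "pitch", "roll", "x", "y", "z"] : List String).zip vs)).items

-- reference chunking: successive 7-token groups, last one possibly partial
def pvChunks (xs : List String) : List (List (String × String)) :=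
  if h : xs = [] then [] else pvMkd (xs.take 7) :: pvChunks (xs.drop 7)
termination_by xs.length
decreasing_by
  cases xs with
  | nil => exact absurd rfl h
  | cons a t => simp [List.length_drop]

-- B's loop body and final flush, as named functions
def pvStep (st : List (List (String × String)) × List String) (tok : String) :
    List (List (String × String)) × List String :=
  let buf := st.2 ++ [tok]
  if buf.length = 7 then (st.1 ++ [pvMkd buf], []) else (st.1, buf)

def pvFlush (st : List (List (String × String)) × List String) : List (List (String × String)) :=
  if st.2 = [] then st.1 else st.1 ++ [pvMkd st.2]

theorem pvChunks_nil : pvChunks [] = [] := by unfold pvChunks; simp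

theorem pvChunks_cons (xs : List String) (h : xs ≠ []) :
    pvChunks xs = pvMkd (xs.take 7) :: pvChunks (xs.drop 7) := by
  rw [pvChunks]; simp [h]

-- the Nat-level form of A's map of slices
theorem pvMap_eq_chunks : ∀ (n : Nat) (ys : List String), ys.length ≤ n →
    (List.range ((ys.length + 6) / 7)).map (fun k => pvMkd ((ys.drop (7 * k)).take 7)) = pvChunks ys := by
  intro n
  induction n with
  | zero =>
    intro ys hy
    have : ys = [] := List.eq_nil_of_length_eq_zero (Nat.le_zero.mp hy)
    subst this; simp [pvChunks_nil]
  | succ m ih =>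
    intro ys hy
    by_cases hnil : ys = []
    · subst hnil; simp [pvChunks_nil]
    · have hpos : 0 < ys.length := List.length_pos_iff.mpr hnil
      have hK : (ys.length + 6) / 7 = ((ys.drop 7).length + 6) / 7 + 1 := by
        simp only [List.length_drop]; omega
      rw [hK, List.range_succ_eq_map, List.map_cons, List.map_map]
      rw [pvChunks_cons ys hnil]
      have hfun : (fun k => pvMkd ((ys.drop (7 * k)).take 7)) ∘ Nat.succ
          = fun k => pvMkd (((ys.drop 7).drop (7 * k)).take 7) := by
        funext k
        simp only [Function.comp_apply]
        congr 2
        rw [List.drop_drop]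
        congr 1
        omega
      rw [hfun, ih (ys.drop 7) (by simp only [List.length_drop]; omega)]
      simp

-- A's fold over range(0, len, 7) equals the reference chunking
theorem pvA_eq (xs : List String) :
    (PySem.List.pyRange 0 (xs.length : Int) 7).foldl
      (fun acc i => acc ++ [pvMkd (PySem.List.slice xs (some i) (some (i + 7)))]) []
    = pvChunks xs := by
  rw [PySem.List.foldl_append_singleton_eq_map]
  rw [PySem.List.pyRange_of_pos 0 (xs.length : Int) (by norm_num)]
  rw [List.map_map, List.nil_append]
  have hcnt : (if (0:Int) < (xs.length : Int) then (((xs.length : Int) - 0 + 7 - 1) / 7).toNat else 0)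
      = (xs.length + 6) / 7 := by
    split_ifs with h
    · have h1 : ((xs.length : Int) - 0 + 7 - 1) = ((xs.length + 6 : Nat) : Int) := by push_cast; ring
      rw [h1, show ((7:Int) = ((7:Nat) : Int)) from rfl, ← Int.natCast_ediv]
      exact Int.toNat_natCast _
    · have : xs.length = 0 := by omega
      omega
  rw [hcnt]
  have hfun : ((fun i => pvMkd (PySem.List.slice xs (some i) (some (i + 7)))) ∘ fun k : Nat => (0:Int) + 7 * (k : Int))
      = fun k : Nat => pvMkd ((xs.drop (7 * k)).take 7) := by
    funext k
    have h1 : (0:Int) + 7 * (k : Int) = ((7 * k : Nat) : Int) := by push_cast; ring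
    have h2 : (0:Int) + 7 * (k : Int) + 7 = ((7 * k + 7 : Nat) : Int) := by push_cast; ring
    simp only [Function.comp_apply]
    rw [h2, h1, PySem.List.slice_natCast]
    simp
  rw [hfun]
  exact pvMap_eq_chunks xs.length xs le_rfl

-- B's buffered pass, from any state with a partial buffer, equals the reference chunking
theorem pvB_eq_chunks : ∀ (xs : List String) (acc : List (List (String × String))) (buf : List String),
    buf.length < 7 → pvFlush (xs.foldl pvStep (acc, buf)) = acc ++ pvChunks (buf ++ xs) := by
  intro xs
  induction xs with
  | nil =>
    intro acc buf hb
    by_cases h : buf = []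
    · subst h; simp [pvFlush, pvChunks_nil]
    · simp only [List.foldl_nil, List.append_nil, pvFlush, if_neg h]
      rw [pvChunks_cons buf h, List.take_of_length_le (by omega), List.drop_eq_nil_of_le (by omega),
        pvChunks_nil]
  | cons t xs ih =>
    intro acc buf hb
    rw [List.foldl_cons]
    by_cases h7 : (buf ++ [t]).length = 7
    · have hstep : pvStep (acc, buf) t = (acc ++ [pvMkd (buf ++ [t])], []) := by
        simp [pvStep, h7]
      rw [hstep, ih _ [] (by norm_num)]
      have hne : (buf ++ [t]) ++ xs ≠ [] := by simp
      have : buf ++ t :: xs = (buf ++ [t]) ++ xs := by simp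
      rw [this, pvChunks_cons _ hne, ← h7, List.take_left, List.drop_left]
      simp
    · have hstep : pvStep (acc, buf) t = (acc, buf ++ [t]) := by
        have h6 : ¬ buf.length = 6 := by simp at h7; omega
        simp [pvStep, h6]
      rw [hstep, ih acc (buf ++ [t]) (Nat.lt_of_le_of_ne
        (by simp only [List.length_append, List.length_cons, List.length_nil]; omega) h7)]
      simp

-- ===== VERDICT (by name: the statement is the Claim_ definition above) =====
theorem addDictionary_spec : Claim_equal_addDictionary := by
  intro data _
  show addDictionary data = addDictionary_alt data
  exact (pvA_eq ((PySem.Str.split? data " ").getD [])).trans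
    (pvB_eq_chunks ((PySem.Str.split? data " ").getD []) [] [] (by norm_num)).symm
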